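-- pv_equiv track=rewrite | github.com/r-1317/AtCoder | 2026/AHC064/a02.py | is_valid_pairs
-- ===== SOURCE A (Python) =====
-- def is_valid_pairs(pairs):
-- 	dep_used = set()
-- 	sid_used = set()
-- 	for i, j in pairs:
-- 		if i in dep_used or j in sid_used:
-- 			return False
-- 		dep_used.add(i)
-- 		sid_used.add(j)
--
-- 	pairs_sorted = sorted(pairs)
-- 	for idx in range(len(pairs_sorted) - 1):
-- 		if not (pairs_sorted[idx][1] < pairs_sorted[idx + 1][1]):
-- 			return False
-- 	return True
-- ===== SOURCE B (Python) =====
-- def is_valid_pairs(pairs):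
-- 	prev = None
-- 	for i, j in sorted(pairs):
-- 		if prev is not None:
-- 			pi, pj = prev
-- 			if not (pi < i and pj < j):
-- 				return False
-- 		prev = (i, j)
-- 	return True
-- ===== Notes on version B (the rewrite author's own statement) =====
-- stated objective: simpler
-- what changed: A validates with two hash sets (distinct first and second coordinates) plus a separate adjacent-second-coordinate scan of the sorted list; B sorts once and makes a single pass keeping the previous pair, requiring both coordinates to strictly increase, since strict increase in both coordinates on the sorted list is equivalent to A's three checks.
import Mathlib
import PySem

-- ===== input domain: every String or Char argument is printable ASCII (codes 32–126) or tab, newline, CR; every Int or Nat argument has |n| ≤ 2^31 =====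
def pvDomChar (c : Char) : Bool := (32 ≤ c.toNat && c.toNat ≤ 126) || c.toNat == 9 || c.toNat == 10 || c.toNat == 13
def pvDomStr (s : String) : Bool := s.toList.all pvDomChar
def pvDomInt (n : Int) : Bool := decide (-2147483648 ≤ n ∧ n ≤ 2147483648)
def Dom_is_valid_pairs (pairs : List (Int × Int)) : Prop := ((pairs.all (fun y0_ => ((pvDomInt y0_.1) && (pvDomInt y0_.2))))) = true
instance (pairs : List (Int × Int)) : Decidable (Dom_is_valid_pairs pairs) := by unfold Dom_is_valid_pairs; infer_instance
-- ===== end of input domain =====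

-- B replaces A's two hash-set distinctness passes plus a sorted adjacent-second-coordinate scan
-- by a single pass over the sorted list checking that BOTH coordinates strictly increase (objective: simpler).

-- ===== PORT A =====
-- first loop of A: walk pairs, tracking the sets dep_used / sid_used, early-return False on a repeat
def aDistinct : List (Int × Int) → PySem.Set Int → PySem.Set Int → Bool
  | [], _, _ => true
  | (i, j) :: rest, dep, sid =>
      if PySem.Set.contains dep i || PySem.Set.contains sid j then false
      else aDistinct rest (PySem.Set.add dep i) (PySem.Set.add sid j)

-- second loop of A: for idx in range(len-1), compare pairs_sorted[idx][1] with pairs_sorted[idx+1][1]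
def aAdj : List (Int × Int) → Bool
  | a :: b :: rest => if ¬ (a.2 < b.2) then false else aAdj (b :: rest)
  | _ => true

def is_valid_pairs (pairs : List (Int × Int)) : Bool :=
  if aDistinct pairs PySem.Set.empty PySem.Set.empty then
    aAdj (PySem.List.sorted2 pairs Prod.fst Prod.snd false)
  else false

-- ===== PORT B =====
-- B's single pass: prev : Option, require prev.1 < i and prev.2 < j at every step
def bGo : Option (Int × Int) → List (Int × Int) → Bool
  | _, [] => true
  | none, p :: rest => bGo (some p) rest
  | some q, p :: rest => if q.1 < p.1 ∧ q.2 < p.2 then bGo (some p) rest else false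

def is_valid_pairs_alt (pairs : List (Int × Int)) : Bool :=
  bGo none (PySem.List.sorted2 pairs Prod.fst Prod.snd false)

-- ===== PRECONDITION & SPEC =====
def Spec_is_valid_pairs (pairs : List (Int × Int)) (out : Bool) : Prop := out = is_valid_pairs_alt pairs
instance (pairs : List (Int × Int)) (out : Bool) : Decidable (Spec_is_valid_pairs pairs out) := by unfold Spec_is_valid_pairs; infer_instance

-- ===== CLAIM (what is proved, stated in full; the proofs are below) =====
def Claim_equal_is_valid_pairs : Prop := ∀ (pairs : List (Int × Int)), Dom_is_valid_pairs pairs → Spec_is_valid_pairs pairs (is_valid_pairs pairs)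

-- ===== LEMMAS AND PROOFS =====

-- strict lexicographic order on pairs (the order Python's sorted uses on tuples)
def lexLt (a b : Int × Int) : Prop := a.1 < b.1 ∨ (a.1 = b.1 ∧ a.2 < b.2)

theorem before_eq_lexLt (a b : Int × Int) :
    (decide (a.1 < b.1) || !decide (b.1 < a.1) && decide (a.2 < b.2)) = true ↔ lexLt a b := by
  unfold lexLt
  by_cases h1 : a.1 < b.1 <;> by_cases h2 : b.1 < a.1 <;> by_cases h3 : a.2 < b.2 <;>
    simp [h1, h2, h3] <;> omega

theorem insertBy_pairwise (x : Int × Int) (ys : List (Int × Int))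
    (h : ys.Pairwise (fun a b => ¬ lexLt b a)) :
    (PySem.List.insertBy (fun a b => decide (a.1 < b.1) || !decide (b.1 < a.1) && decide (a.2 < b.2))
      x ys).Pairwise (fun a b => ¬ lexLt b a) := by
  induction ys with
  | nil => simp [PySem.List.insertBy]
  | cons y ys ih =>
    rw [List.pairwise_cons] at h
    obtain ⟨hy, hys⟩ := h
    unfold PySem.List.insertBy
    split
    · rename_i hb
      rw [before_eq_lexLt] at hb
      refine List.pairwise_cons.2 ⟨?_, List.pairwise_cons.2 ⟨hy, hys⟩⟩
      intro z hz
      rcases List.mem_cons.1 hz with rfl | hz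
      · unfold lexLt at *; omega
      · have := hy z hz
        unfold lexLt at *; omega
    · rename_i hb
      refine List.pairwise_cons.2 ⟨?_, ih hys⟩
      intro z hz
      rw [PySem.List.insertBy_mem_iff] at hz
      rcases hz with rfl | hz
      · intro hc
        apply hb
        rw [before_eq_lexLt]
        unfold lexLt at *; omega
      · exact hy z hz

theorem foldl_insertBy_pairwise (xs acc : List (Int × Int))
    (h : acc.Pairwise (fun a b => ¬ lexLt b a)) :
    (xs.foldl (fun acc x =>
        PySem.List.insertBy (fun a b => decide (a.1 < b.1) || !decide (b.1 < a.1) && decide (a.2 < b.2)) x acc)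
      acc).Pairwise (fun a b => ¬ lexLt b a) := by
  induction xs generalizing acc with
  | nil => exact h
  | cons x xs ih => exact ih _ (insertBy_pairwise x acc h)

theorem sorted2_pairwise (pairs : List (Int × Int)) :
    (PySem.List.sorted2 pairs Prod.fst Prod.snd false).Pairwise (fun a b => ¬ lexLt b a) :=
  foldl_insertBy_pairwise pairs [] List.Pairwise.nil

-- characterisation of A's first loop
theorem aDistinct_iff (l : List (Int × Int)) (dep sid : PySem.Set Int) :
    aDistinct l dep sid = true ↔
      (l.map Prod.fst).Nodup ∧ (l.map Prod.snd).Nodup ∧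
      (∀ p ∈ l, p.1 ∉ dep) ∧ (∀ p ∈ l, p.2 ∉ sid) := by
  induction l generalizing dep sid with
  | nil => simp [aDistinct]
  | cons p rest ih =>
    obtain ⟨i, j⟩ := p
    by_cases hmem : (PySem.Set.contains dep i || PySem.Set.contains sid j) = true
    · simp only [aDistinct, if_pos hmem]
      simp only [Bool.or_eq_true, PySem.Set.contains_eq_decide, decide_eq_true_eq] at hmem
      constructor
      · intro h; exact absurd h (by simp)
      · rintro ⟨_, _, h3, h4⟩
        rcases hmem with h | h
        · exact absurd h (h3 (i, j) (List.mem_cons_self ..))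
        · exact absurd h (h4 (i, j) (List.mem_cons_self ..))
    · simp only [aDistinct, if_neg hmem]
      rw [ih]
      simp only [Bool.or_eq_true, PySem.Set.contains_eq_decide, decide_eq_true_eq, not_or] at hmem
      obtain ⟨hdi, hsj⟩ := hmem
      constructor
      · rintro ⟨h1, h2, h3, h4⟩
        refine ⟨?_, ?_, ?_, ?_⟩
        · simp only [List.map_cons, List.nodup_cons]
          refine ⟨?_, h1⟩
          intro hc
          rw [List.mem_map] at hc
          obtain ⟨q, hq, hqi⟩ := hc
          have := h3 q hq
          rw [PySem.Set.mem_add] at this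
          exact this (Or.inr hqi)
        · simp only [List.map_cons, List.nodup_cons]
          refine ⟨?_, h2⟩
          intro hc
          rw [List.mem_map] at hc
          obtain ⟨q, hq, hqj⟩ := hc
          have := h4 q hq
          rw [PySem.Set.mem_add] at this
          exact this (Or.inr hqj)
        · intro q hq
          rcases List.mem_cons.1 hq with rfl | hq
          · exact hdi
          · intro hc
            exact h3 q hq ((PySem.Set.mem_add dep i q.1).2 (Or.inl hc))
        · intro q hq
          rcases List.mem_cons.1 hq with rfl | hq
          · exact hsj
          · intro hc
            exact h4 q hq ((PySem.Set.mem_add sid j q.2).2 (Or.inl hc))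
      · rintro ⟨h1, h2, h3, h4⟩
        simp only [List.map_cons, List.nodup_cons] at h1 h2
        refine ⟨h1.2, h2.2, ?_, ?_⟩
        · intro q hq
          rw [PySem.Set.mem_add]
          rintro (hc | hc)
          · exact h3 q (List.mem_cons_of_mem _ hq) hc
          · exact h1.1 (List.mem_map.2 ⟨q, hq, hc⟩)
        · intro q hq
          rw [PySem.Set.mem_add]
          rintro (hc | hc)
          · exact h4 q (List.mem_cons_of_mem _ hq) hc
          · exact h2.1 (List.mem_map.2 ⟨q, hq, hc⟩)

-- characterisation of A's second loop
theorem aAdj_iff (l : List (Int × Int)) :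
    aAdj l = true ↔ l.IsChain (fun a b => a.2 < b.2) := by
  induction l with
  | nil => simp [aAdj]
  | cons a rest ih =>
    cases rest with
    | nil => simp [aAdj]
    | cons b rest =>
      by_cases h : a.2 < b.2
      · simp only [aAdj, h, not_true, if_false, List.isChain_cons (l := b :: rest),
          List.head?_cons, Option.mem_some_iff]
        rw [ih]
        constructor
        · intro hc; exact ⟨fun y hy => hy ▸ h, hc⟩
        · exact fun hc => hc.2
      · simp only [aAdj, h, not_false_iff, if_pos]
        simp only [Bool.false_eq_true, false_iff]
        intro hc
        rw [List.isChain_cons] at hc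
        exact h (hc.1 b rfl)

-- characterisation of B's loop
theorem bGo_some_iff (l : List (Int × Int)) (q : Int × Int) :
    bGo (some q) l = true ↔ (q :: l).IsChain (fun a b => a.1 < b.1 ∧ a.2 < b.2) := by
  induction l generalizing q with
  | nil => simp [bGo]
  | cons p rest ih =>
    by_cases h : q.1 < p.1 ∧ q.2 < p.2
    · simp only [bGo, if_pos h]
      rw [ih, List.isChain_cons (x := q), List.head?_cons]
      constructor
      · intro hc; exact ⟨fun y hy => Option.mem_some_iff.1 hy ▸ h, hc⟩
      · exact fun hc => hc.2
    · simp only [bGo, if_neg h, Bool.false_eq_true, false_iff]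
      intro hc
      rw [List.isChain_cons (x := q)] at hc
      exact h (hc.1 p rfl)

theorem bGo_none_iff (l : List (Int × Int)) :
    bGo none l = true ↔ l.IsChain (fun a b => a.1 < b.1 ∧ a.2 < b.2) := by
  cases l with
  | nil => simp [bGo]
  | cons p rest => simpa [bGo] using bGo_some_iff rest p

-- combine two adjacency chains into one
theorem isChain_and {α : Type} (R S : α → α → Prop) (l : List α)
    (h1 : l.IsChain R) (h2 : l.IsChain S) : l.IsChain (fun a b => R a b ∧ S a b) := by
  induction l with
  | nil => exact List.isChain_nil
  | cons a rest ih =>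
    rw [List.isChain_cons] at h1 h2 ⊢
    exact ⟨fun y hy => ⟨h1.1 y hy, h2.1 y hy⟩, ih h1.2 h2.2⟩

theorem is_valid_pairs_eq (pairs : List (Int × Int)) :
    is_valid_pairs pairs = is_valid_pairs_alt pairs := by
  set s := PySem.List.sorted2 pairs Prod.fst Prod.snd false with hs
  have hperm : s.Perm pairs := PySem.List.sorted2_perm pairs Prod.fst Prod.snd false
  have hpw : s.Pairwise (fun a b => ¬ lexLt b a) := sorted2_pairwise pairs
  have hBiff : is_valid_pairs_alt pairs = true ↔ s.IsChain (fun a b => a.1 < b.1 ∧ a.2 < b.2) := by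
    unfold is_valid_pairs_alt
    rw [← hs, bGo_none_iff]
  have hAiff : is_valid_pairs pairs = true ↔
      ((pairs.map Prod.fst).Nodup ∧ (pairs.map Prod.snd).Nodup ∧
        s.IsChain (fun a b => a.2 < b.2)) := by
    unfold is_valid_pairs
    rw [← hs]
    by_cases hd : aDistinct pairs PySem.Set.empty PySem.Set.empty = true
    · rw [if_pos hd, aAdj_iff]
      rw [aDistinct_iff] at hd
      simp only [hd.1, hd.2.1, true_and]
    · rw [if_neg hd]
      simp only [Bool.false_eq_true, false_iff]
      rintro ⟨h1, h2, _⟩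
      exact hd ((aDistinct_iff ..).2 ⟨h1, h2, by simp [PySem.Set.empty], by simp [PySem.Set.empty]⟩)
  have key : ((pairs.map Prod.fst).Nodup ∧ (pairs.map Prod.snd).Nodup ∧
      s.IsChain (fun a b => a.2 < b.2)) ↔ s.IsChain (fun a b => a.1 < b.1 ∧ a.2 < b.2) := by
    constructor
    · rintro ⟨h1, _, h3⟩
      have hnds : (s.map Prod.fst).Nodup := ((hperm.map Prod.fst).nodup_iff).2 h1
      have hne : s.Pairwise (fun a b => a.1 ≠ b.1) := by
        rw [List.Nodup, List.pairwise_map] at hnds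
        exact hnds
      have hch1 : s.IsChain (fun a b => a.1 < b.1) := by
        have := List.Pairwise.isChain (List.Pairwise.and hpw hne)
        refine this.imp ?_
        rintro a b ⟨hna, hab⟩
        unfold lexLt at hna
        omega
      exact isChain_and _ _ _ hch1 h3
    · intro h
      have hch1 : (s.map Prod.fst).IsChain (· < ·) := by
        rw [List.isChain_map]
        exact h.imp (by intro a b hab; exact hab.1)
      have hch2 : (s.map Prod.snd).IsChain (· < ·) := by
        rw [List.isChain_map]
        exact h.imp (by intro a b hab; exact hab.2)
      refine ⟨?_, ?_, h.imp (by intro a b hab; exact hab.2)⟩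
      · have : (s.map Prod.fst).Nodup := (List.isChain_iff_pairwise.1 hch1).imp ne_of_lt
        exact ((hperm.map Prod.fst).nodup_iff).1 this
      · have : (s.map Prod.snd).Nodup := (List.isChain_iff_pairwise.1 hch2).imp ne_of_lt
        exact ((hperm.map Prod.snd).nodup_iff).1 this
  rcases hb : is_valid_pairs_alt pairs with _ | _
  · rcases ha : is_valid_pairs pairs with _ | _
    · rfl
    · exfalso
      have := key.1 (hAiff.1 ha)
      rw [← hBiff] at this
      simp [hb] at this
  · exact hAiff.2 (key.2 (hBiff.1 hb))

-- ===== VERDICT (by name: the statement is the Claim_ definition above) =====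
theorem is_valid_pairs_spec : Claim_equal_is_valid_pairs := by
  intro pairs _
  unfold Spec_is_valid_pairs
  exact is_valid_pairs_eq pairs
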